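-- pv_equiv track=rewrite | github.com/Luongduytoan2006/DUT-AI-CLUB-HOMEWORK | day 6 25-10-2025/homework/b3.py | computeXDerivative
-- ===== SOURCE A (Python) =====
-- def computeXDerivative(image):
--     h, w = len(image), len(image[0])
--     gx = [[0]*w for _ in range(h)]
--     for i in range(h):
--         for j in range(w):
--             left  = image[i][j-1] if j-1 >= 0 else image[i][j]
--             right = image[i][j+1] if j+1 < w else image[i][j]
--             val = int(right) - int(left)
--             gx[i][j] = max(0, min(255, val + 128))
--     return gx
-- ===== SOURCE B (Python) =====
-- def computeXDerivative(image):
--     cols = list(zip(*image))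
--     w = len(cols)
--     if w == 0:
--         return [[] for _ in image]
--     gcols = [
--         [max(0, min(255, int(r) - int(l) + 128))
--          for l, r in zip(cols[max(j - 1, 0)], cols[min(j + 1, w - 1)])]
--         for j in range(w)
--     ]
--     return [list(col) for col in zip(*gcols)]
-- ===== Notes on version B (the rewrite author's own statement) =====
-- stated objective: alternative
-- what changed: B works column-major via double transposition: it transposes the image with zip(*image), builds each output column from its two neighbour columns selected by clamped indices max(j-1,0)/min(j+1,w-1), and transposes back, instead of A's row-major per-pixel left/right boundary conditionals writing into a preallocated grid.
import Mathlib
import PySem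

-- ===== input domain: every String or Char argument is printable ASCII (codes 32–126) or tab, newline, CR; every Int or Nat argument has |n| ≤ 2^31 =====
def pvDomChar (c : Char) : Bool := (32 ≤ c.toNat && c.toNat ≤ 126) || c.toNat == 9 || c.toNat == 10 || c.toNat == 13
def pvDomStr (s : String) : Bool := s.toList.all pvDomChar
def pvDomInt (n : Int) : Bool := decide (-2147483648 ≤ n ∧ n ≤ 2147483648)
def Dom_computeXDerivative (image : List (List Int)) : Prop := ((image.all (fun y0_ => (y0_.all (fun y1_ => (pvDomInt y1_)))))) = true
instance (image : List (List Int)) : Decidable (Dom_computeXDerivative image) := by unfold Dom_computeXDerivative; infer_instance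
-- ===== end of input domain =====

-- B computes the derivative column-major: it transposes the image (Python zip(*image)),
-- builds each output COLUMN from its two clamped-index neighbour columns, and transposes
-- back — a different traversal than A's row-major per-pixel boundary conditionals (alternative).

-- ===== PORT A =====
def computeXDerivative (image : List (List Int)) : List (List Int) :=
  let h : Int := image.length
  -- image[0]: IndexError on the empty image, excluded by Pre_
  let w : Int := ((PySem.List.pyGet? image 0).getD []).length
  let gx : List (List Int) :=
    (PySem.List.pyRange 0 h 1).map (fun _ => PySem.List.pyRepeat [(0 : Int)] w)
  (PySem.List.pyRange 0 h 1).foldl (fun gx i =>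
    (PySem.List.pyRange 0 w 1).foldl (fun gx j =>
      let rowi := (PySem.List.pyGet? image i).getD []
      let left  := if j - 1 ≥ 0 then (PySem.List.pyGet? rowi (j - 1)).getD 0
                   else (PySem.List.pyGet? rowi j).getD 0
      let right := if j + 1 < w then (PySem.List.pyGet? rowi (j + 1)).getD 0
                   else (PySem.List.pyGet? rowi j).getD 0
      let val := right - left
      let cur := (PySem.List.pyGet? gx i).getD []
      gx.set i.toNat (cur.set j.toNat (max 0 (min 255 (val + 128))))) gx) gx

-- ===== PORT B =====
-- Python's zip(*rows): column k of the result pairs the k-th elements of all rows,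
-- stopping at the shortest row (zip() of no iterables is empty). Exact: every index
-- read is < the minimum length, so the getD default is never taken.
def pyZipCols (rows : List (List Int)) : List (List Int) :=
  match rows with
  | [] => []
  | r0 :: rest =>
    let n := rest.foldl (fun m r => min m r.length) r0.length
    (List.range n).map (fun j => (r0 :: rest).map (fun r => r.getD j 0))

def computeXDerivative_alt (image : List (List Int)) : List (List Int) :=
  let cols := pyZipCols image
  let w := cols.length
  if w = 0 then image.map (fun _ => ([] : List Int))
  else
    -- Nat subtraction truncates at 0, which is exactly Python's max(j - 1, 0)
    let gcols := (List.range w).map (fun j =>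
      List.zipWith (fun l r => max 0 (min 255 (r - l + 128)))
        (cols.getD (max (j - 1) 0) []) (cols.getD (min (j + 1) (w - 1)) []))
    pyZipCols gcols

-- ===== PRECONDITION & SPEC =====
-- Exactly where A returns: A raises IndexError on the empty image (it reads image[0] for the
-- width w) and whenever some row is shorter than w (the neighbour lookups run off that row).
def Pre_computeXDerivative (image : List (List Int)) : Prop :=
  image ≠ [] ∧ ∀ row ∈ image, (image.headD []).length ≤ row.length
instance (image : List (List Int)) : Decidable (Pre_computeXDerivative image) := by
  unfold Pre_computeXDerivative; infer_instance

def pvWitness_computeXDerivative : List (List Int) := [[10, 200, 30], [0, 0, 255]]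

def Spec_computeXDerivative (image : List (List Int)) (out : List (List Int)) : Prop := out = computeXDerivative_alt image
instance (image : List (List Int)) (out : List (List Int)) : Decidable (Spec_computeXDerivative image out) := by unfold Spec_computeXDerivative; infer_instance

-- ===== CLAIM (what is proved, stated in full; the proofs are below) =====
def Claim_equal_computeXDerivative : Prop := ∀ (image : List (List Int)), Dom_computeXDerivative image → Pre_computeXDerivative image → Spec_computeXDerivative image (computeXDerivative image)

-- ===== LEMMAS AND PROOFS =====

-- the inner j-loop of A: writes v j into cells 0..n-1 of row i, leaving everything else alone
theorem pvInnerLoop (i : Nat) (v : Int → Int) :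
    ∀ (n : Nat) (gx : List (List Int)) (hi : i < gx.length), n ≤ gx[i].length →
    (PySem.List.pyRange 0 (n : Int) 1).foldl
      (fun gx j => gx.set ((i : Int)).toNat
        (((PySem.List.pyGet? gx (i : Int)).getD []).set j.toNat (v j))) gx
    = gx.set i ((List.range n).map (fun j : Nat => v (j : Int)) ++ gx[i].drop n) := by
  intro n
  induction n with
  | zero =>
    intro gx hi _
    rw [show ((0 : Nat) : Int) = 0 from rfl, PySem.List.pyRange_one_eq_nil le_rfl]
    simp [List.set_getElem_self]
  | succ n ih =>
    intro gx hi hn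
    have h1 : ((n + 1 : Nat) : Int) = (n : Int) + 1 := by push_cast; ring
    rw [h1, PySem.List.pyRange_one_succ_right (by positivity), List.foldl_append,
      ih gx hi (by omega)]
    simp only [List.foldl_cons, List.foldl_nil, Int.toNat_natCast]
    have hiX : i < (gx.set i ((List.range n).map (fun j : Nat => v (j : Int)) ++ gx[i].drop n)).length := by
      simpa using hi
    have hG : (PySem.List.pyGet?
        (gx.set i ((List.range n).map (fun j : Nat => v (j : Int)) ++ gx[i].drop n)) (i : Int)).getD []
        = (List.range n).map (fun j : Nat => v (j : Int)) ++ gx[i].drop n := by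
      rw [PySem.List.pyGet?_natCast, List.getElem?_eq_getElem hiX]
      simp
    rw [hG, List.set_set]
    congr 1
    rw [List.set_append_right _ _ (by simp)]
    have hdrop : gx[i].drop n = gx[i][n]'(by omega) :: gx[i].drop (n + 1) := by
      rw [List.getElem_cons_drop]
    simp [List.range_succ]
    rw [hdrop, List.set_cons_zero]

-- the outer i-loop of A on a rectangular gx whose rows all have length w'
theorem pvOuterLoop (w' : Nat) (v : Int → Int → Int) :
    ∀ (n : Nat) (gx : List (List Int)), n ≤ gx.length →
    (∀ k (hk : k < gx.length), gx[k].length = w') →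
    (PySem.List.pyRange 0 (n : Int) 1).foldl
      (fun gx i => (PySem.List.pyRange 0 (w' : Int) 1).foldl
        (fun gx j => gx.set i.toNat
          (((PySem.List.pyGet? gx i).getD []).set j.toNat (v i j))) gx) gx
    = (List.range n).map (fun i : Nat => (List.range w').map (fun j : Nat => v (i : Int) (j : Int)))
      ++ gx.drop n := by
  intro n
  induction n with
  | zero =>
    intro gx _ _
    rw [show ((0 : Nat) : Int) = 0 from rfl, PySem.List.pyRange_one_eq_nil le_rfl]
    simp
  | succ n ih =>
    intro gx hn hrows
    have h1 : ((n + 1 : Nat) : Int) = (n : Int) + 1 := by push_cast; ring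
    rw [h1, PySem.List.pyRange_one_succ_right (by positivity), List.foldl_append,
      ih gx (by omega) hrows]
    set pre := (List.range n).map (fun i : Nat => (List.range w').map (fun j : Nat => v (i : Int) (j : Int))) with hpredef
    have hprelen : pre.length = n := by simp [hpredef]
    have hnG : n < (pre ++ gx.drop n).length := by
      simp only [List.length_append, hprelen, List.length_drop]; omega
    have hGn : (pre ++ gx.drop n)[n]'hnG = gx[n]'(by omega) := by
      rw [List.getElem_append_right (by omega)]
      simp [hprelen]
    simp only [List.foldl_cons, List.foldl_nil]
    rw [pvInnerLoop n (fun j => v (n : Int) j) w' (pre ++ gx.drop n) hnG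
      (by rw [hGn, hrows n (by omega)])]
    rw [hGn]
    have hnil : List.drop w' (gx[n]'(by omega)) = [] :=
      List.drop_eq_nil_of_le (by rw [hrows n (by omega)])
    rw [hnil, List.append_nil]
    rw [List.set_append_right _ _ (by omega)]
    have hdropg : gx.drop n = gx[n]'(by omega) :: gx.drop (n + 1) := by
      rw [List.getElem_cons_drop]
    simp [List.range_succ, hpredef]
    rw [hdropg, List.set_cons_zero]

-- min-fold of zip bottoms out at the first row's length when no row is shorter
theorem pvMinFold (rest : List (List Int)) (m : Nat)
    (h : ∀ r ∈ rest, m ≤ r.length) :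
    rest.foldl (fun m r => min m r.length) m = m := by
  induction rest with
  | nil => rfl
  | cons r rs ih =>
    simp only [List.foldl_cons]
    rw [min_eq_left (h r (by simp))]
    exact ih (fun r' hr' => h r' (by simp [hr']))

-- one cell: A's branching neighbour selection = B's clamped-index lookup
theorem pvCellEq (r : List Int) (w' : Nat) (hw : w' ≤ r.length) (j : Nat) (hj : j < w') :
    max 0 (min 255 ((if (j : Int) + 1 < (w' : Int) then (PySem.List.pyGet? r ((j : Int) + 1)).getD 0
          else (PySem.List.pyGet? r (j : Int)).getD 0)
        - (if (j : Int) - 1 ≥ 0 then (PySem.List.pyGet? r ((j : Int) - 1)).getD 0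
          else (PySem.List.pyGet? r (j : Int)).getD 0) + 128))
    = max 0 (min 255 (r.getD (min (j + 1) (w' - 1)) 0 - r.getD (max (j - 1) 0) 0 + 128)) := by
  have hget : ∀ (k : Nat), k < w' → (PySem.List.pyGet? r ((k : Nat) : Int)).getD 0 = r.getD k 0 := by
    intro k hk
    rw [PySem.List.pyGet?_natCast, List.getElem?_eq_getElem (by omega), List.getD_eq_getElem?_getD,
      List.getElem?_eq_getElem (by omega)]
  have hR : (if (j : Int) + 1 < (w' : Int) then (PySem.List.pyGet? r ((j : Int) + 1)).getD 0
        else (PySem.List.pyGet? r (j : Int)).getD 0) = r.getD (min (j + 1) (w' - 1)) 0 := by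
    rcases lt_or_ge (j + 1) w' with hin | hout
    · rw [if_pos (by exact_mod_cast hin),
        show ((j : Int) + 1) = ((j + 1 : Nat) : Int) from by push_cast; ring,
        hget (j + 1) hin, min_eq_left (by omega)]
    · rw [if_neg (by exact_mod_cast not_lt.mpr hout), hget j hj, min_eq_right (by omega),
        show w' - 1 = j from by omega]
  have hL : (if (j : Int) - 1 ≥ 0 then (PySem.List.pyGet? r ((j : Int) - 1)).getD 0
        else (PySem.List.pyGet? r (j : Int)).getD 0) = r.getD (max (j - 1) 0) 0 := by
    rcases Nat.eq_zero_or_pos j with h0 | h0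
    · subst h0
      rw [if_neg (by omega)]
      simpa using hget 0 hj
    · rw [if_pos (by omega),
        show ((j : Int) - 1) = ((j - 1 : Nat) : Int) from by push_cast [h0]; ring,
        hget (j - 1) (by omega), show max (j - 1) 0 = j - 1 from by omega]
  rw [hR, hL]

-- ===== VERDICT (by name: the statement is the Claim_ definition above) =====
theorem computeXDerivative_spec : Claim_equal_computeXDerivative := by
  intro image _ hpre
  obtain ⟨hne, hrect⟩ := hpre
  unfold Spec_computeXDerivative
  obtain ⟨r0, rest, rfl⟩ : ∃ r0 rest, image = r0 :: rest := by
    cases image with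
    | nil => exact absurd rfl hne
    | cons a l => exact ⟨a, l, rfl⟩
  have hw : ∀ row ∈ (r0 :: rest), r0.length ≤ row.length := by simpa using hrect
  set img := r0 :: rest with himg
  set h := img.length with hh
  set w' := r0.length with hw'
  -- reduce A to a map of maps
  have hA : computeXDerivative img
      = (List.range h).map (fun i : Nat => (List.range w').map (fun j : Nat =>
          let rowi := (PySem.List.pyGet? img (i : Int)).getD []
          let left  := if (j : Int) - 1 ≥ 0 then (PySem.List.pyGet? rowi ((j : Int) - 1)).getD 0
                       else (PySem.List.pyGet? rowi (j : Int)).getD 0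
          let right := if (j : Int) + 1 < (w' : Int) then (PySem.List.pyGet? rowi ((j : Int) + 1)).getD 0
                       else (PySem.List.pyGet? rowi (j : Int)).getD 0
          max 0 (min 255 (right - left + 128)))) := by
    simp only [computeXDerivative, himg, PySem.List.pyGet?_zero_cons, Option.getD_some]
    have hglen : ((PySem.List.pyRange 0 ((r0 :: rest).length : Int) 1).map
        (fun _ => PySem.List.pyRepeat [(0 : Int)] (r0.length : Int))).length
        = (r0 :: rest).length := by
      simp [PySem.List.length_pyRange_one]
    have hgrows : ∀ k (hk : k < ((PySem.List.pyRange 0 ((r0 :: rest).length : Int) 1).map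
        (fun _ => PySem.List.pyRepeat [(0 : Int)] (r0.length : Int))).length),
        (((PySem.List.pyRange 0 ((r0 :: rest).length : Int) 1).map
          (fun _ => PySem.List.pyRepeat [(0 : Int)] (r0.length : Int)))[k]).length = r0.length := by
      intro k hk
      simp [PySem.List.pyRepeat_singleton]
    rw [pvOuterLoop r0.length _ (r0 :: rest).length _ (le_of_eq hglen.symm) hgrows]
    rw [List.drop_eq_nil_of_le (le_of_eq hglen), List.append_nil]
  rw [hA]
  -- reduce B: the zip of img has exactly w' columns, each the k-th entries of all rows
  have hcols : pyZipCols img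
      = (List.range w').map (fun k => img.map (fun r => r.getD k 0)) := by
    simp only [himg, pyZipCols]
    rw [pvMinFold rest r0.length (fun r hr => hw r (List.mem_cons_of_mem _ hr))]
  rcases Nat.eq_zero_or_pos w' with h0 | hpos
  · -- zero-width image: both sides are h empty rows
    have hcols0 : pyZipCols img = [] := by rw [hcols, h0]; rfl
    simp only [computeXDerivative_alt, hcols0, List.length_nil]
    simp only [h0, List.range_zero, List.map_nil, if_pos]
    rw [List.map_const', List.map_const', List.length_range, hh]
  · -- positive width
    have hclen : (pyZipCols img).length = w' := by rw [hcols]; simp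
    simp only [computeXDerivative_alt, hclen, if_neg (Nat.pos_iff_ne_zero.mp hpos)]
    -- each output column, as a map over the rows
    have hcget : ∀ (k : Nat), k < w' →
        (pyZipCols img).getD k [] = img.map (fun r => r.getD k 0) := by
      intro k hk
      rw [hcols]
      exact PySem.List.getD_map_range _ _ _ _ hk
    have hgcols : (List.range w').map (fun j =>
        List.zipWith (fun l r => max 0 (min 255 (r - l + 128)))
          ((pyZipCols img).getD (max (j - 1) 0) []) ((pyZipCols img).getD (min (j + 1) (w' - 1)) []))
        = (List.range w').map (fun j => img.map (fun r =>
            max 0 (min 255 (r.getD (min (j + 1) (w' - 1)) 0 - r.getD (max (j - 1) 0) 0 + 128)))) := by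
      apply List.map_congr_left
      intro j hj
      have hj' : j < w' := List.mem_range.mp hj
      rw [hcget (max (j - 1) 0) (by omega), hcget (min (j + 1) (w' - 1)) (by omega),
        List.zipWith_map, List.zipWith_self]
    rw [hgcols]
    -- back-transpose: all columns have length h, nonempty column list
    obtain ⟨n0, hn0⟩ : ∃ n0, w' = n0 + 1 := ⟨w' - 1, by omega⟩
    have hrange : List.range w' = 0 :: (List.range n0).map Nat.succ := by
      rw [hn0, List.range_succ_eq_map]
    set F : Nat → List Int := fun j => img.map (fun r =>
        max 0 (min 255 (r.getD (min (j + 1) (w' - 1)) 0 - r.getD (max (j - 1) 0) 0 + 128))) with hF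
    have hmap : (List.range w').map F = F 0 :: ((List.range n0).map Nat.succ).map F := by
      rw [hrange]; rfl
    rw [hmap]
    simp only [pyZipCols]
    have hlenF : ∀ j, (F j).length = h := by intro j; simp [hF, hh]
    have hmin : (((List.range n0).map Nat.succ).map F).foldl
        (fun m r => min m r.length) (F 0).length = h := by
      rw [hlenF]
      apply pvMinFold
      intro r hr
      simp only [List.mem_map] at hr
      obtain ⟨j, _, rfl⟩ := hr
      rw [hlenF]
    rw [hmin, ← hmap]
    -- pointwise equality of the two h × w' grids
    apply List.map_congr_left
    intro i hi
    have hi' : i < img.length := by rw [← hh]; exact List.mem_range.mp hi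
    have hrowi : (PySem.List.pyGet? img (i : Int)).getD [] = img[i] := by
      rw [PySem.List.pyGet?_natCast, List.getElem?_eq_getElem hi']
      simp
    rw [List.map_map]
    apply List.map_congr_left
    intro j hj
    have hj' : j < w' := List.mem_range.mp hj
    have hFj : (F j).getD i 0 = max 0 (min 255 ((img[i]).getD (min (j + 1) (w' - 1)) 0
        - (img[i]).getD (max (j - 1) 0) 0 + 128)) := by
      rw [hF]
      simp only [List.getD_eq_getElem?_getD, List.getElem?_map,
        List.getElem?_eq_getElem hi']
      rfl
    simp only [Function.comp_apply, hrowi, hFj]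
    exact pvCellEq img[i] w' (hw _ (List.getElem_mem hi')) j hj'
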